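-- pv_equiv track=rewrite | github.com/michaelbrunettiSpectra/LumosAPI | PytestIceCube/lumosHelperFuncs.py | formatter
-- ===== SOURCE A (Python) =====
-- def formatter(firmwareVersion):
--     charString = ""
--     charGroup = ""
--     count = 1
--     for char in firmwareVersion:
--         # a group consists of chars ending with ".", unless it is the last group in the firmware version
--         if char == ".":
--             charGroup += char
--             # This is a group of chars that leads with a 0, exclude leading 0 from firmware string
--             if len(charGroup) > 2 and charGroup[0] == "0":
--                 charString += charGroup[1:]
--             # No leading 0 OR 0 is the only character in the group
--             else:
--                 charString += charGroup
--             charGroup = ""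
--             count += 1
--         # This is the last character in the firmware string
--         elif count == len(firmwareVersion):
--             charGroup += char
--             # This is a group of chars that leads with a 0, exclude leading 0 from firmware string
--             if len(charGroup) >= 2 and charGroup[0] == "0":
--                 charString += charGroup[1:]
--             # No leading 0 OR 0 is the only character in the group
--             else:
--                 charString += charGroup
--         # Keep adding chars to a group unless one of the above conditions is met
--         else:
--             charGroup += char
--             count += 1
--     return charString
-- ===== SOURCE B (Python) =====
-- def formatter(firmwareVersion):
--     groups = firmwareVersion.split(".")
--     return ".".join(g[1:] if len(g) >= 2 and g[0] == "0" else g for g in groups)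
-- ===== Notes on version B (the rewrite author's own statement) =====
-- stated objective: simpler
-- what changed: Replaced A's character-by-character loop with a group buffer and count-based last-char detection by a group-level split on the dot separator, a map stripping one leading zero per group of length >= 2, and a join; avoiding per-character string concatenation also makes B measurably faster.
import Mathlib
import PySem

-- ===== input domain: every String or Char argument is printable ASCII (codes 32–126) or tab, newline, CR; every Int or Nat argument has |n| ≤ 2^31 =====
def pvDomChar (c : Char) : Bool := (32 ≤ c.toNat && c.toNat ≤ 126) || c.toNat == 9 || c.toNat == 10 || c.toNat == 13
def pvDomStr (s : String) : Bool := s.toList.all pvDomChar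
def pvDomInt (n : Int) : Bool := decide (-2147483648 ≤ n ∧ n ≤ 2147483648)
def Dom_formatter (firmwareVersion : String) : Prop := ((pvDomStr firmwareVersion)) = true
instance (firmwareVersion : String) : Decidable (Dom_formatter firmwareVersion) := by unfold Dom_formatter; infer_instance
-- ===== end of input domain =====

-- B replaces A's character-by-character accumulation (group buffer + count-based
-- last-char detection) by split('.') / map / '.'.join over whole groups (objective: simpler).

-- ===== PORT A =====
-- state = (charString, charGroup, count); one step of A's for-loop body
def formatterStep (n : Nat) (st : List Char × List Char × Nat) (char : Char) :
    List Char × List Char × Nat :=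
  if char = '.' then
    if (st.2.1 ++ [char]).length > 2 ∧ PySem.List.pyGet? (st.2.1 ++ [char]) 0 = some '0' then
      (st.1 ++ PySem.List.slice (st.2.1 ++ [char]) (some 1) none, [], st.2.2 + 1)
    else
      (st.1 ++ (st.2.1 ++ [char]), [], st.2.2 + 1)
  else if st.2.2 = n then
    if 2 ≤ (st.2.1 ++ [char]).length ∧ PySem.List.pyGet? (st.2.1 ++ [char]) 0 = some '0' then
      (st.1 ++ PySem.List.slice (st.2.1 ++ [char]) (some 1) none, st.2.1 ++ [char], st.2.2)
    else
      (st.1 ++ (st.2.1 ++ [char]), st.2.1 ++ [char], st.2.2)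
  else
    (st.1, st.2.1 ++ [char], st.2.2 + 1)

def formatter (firmwareVersion : String) : String :=
  String.ofList
    (firmwareVersion.toList.foldl
      (formatterStep firmwareVersion.toList.length) ([], [], 1)).1

-- ===== PORT B =====
-- g[1:] if len(g) >= 2 and g[0] == '0' else g
def stripZero (g : List Char) : List Char :=
  if 2 ≤ g.length ∧ PySem.List.pyGet? g 0 = some '0' then
    PySem.List.slice g (some 1) none
  else g

def formatter_alt (firmwareVersion : String) : String :=
  String.ofList
    (List.intercalate ['.'] ((firmwareVersion.toList.splitOn '.').map stripZero))

-- ===== PRECONDITION & SPEC =====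
def Spec_formatter (firmwareVersion : String) (out : String) : Prop := out = formatter_alt firmwareVersion
instance (firmwareVersion : String) (out : String) : Decidable (Spec_formatter firmwareVersion out) := by unfold Spec_formatter; infer_instance

-- ===== CLAIM (what is proved, stated in full; the proofs are below) =====
def Claim_equal_formatter : Prop := ∀ (firmwareVersion : String), Dom_formatter firmwareVersion → Spec_formatter firmwareVersion (formatter firmwareVersion)

-- ===== LEMMAS AND PROOFS =====

theorem slice_one (l : List Char) : PySem.List.slice l (some 1) none = l.drop 1 := by
  simp [PySem.List.slice]
  cases l <;> simp

theorem pyGet?_cons_zero (a : Char) (t : List Char) :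
    PySem.List.pyGet? (a :: t) 0 = some a := by
  simp [PySem.List.pyGet?, PySem.List.pyIdx?]

theorem intercalate_cons (x : List Char) (xs : List (List Char)) (s : List Char) :
    List.intercalate s (x :: xs) = x ++ if xs = [] then [] else s ++ List.intercalate s xs := by
  cases xs <;> simp [List.intercalate, List.intersperse]

-- reference recursion: what A's loop appends from pending group g over remaining chars cs
def renderF (g : List Char) (cs : List Char) : List Char :=
  match cs with
  | [] => []
  | c :: rest =>
    if c = '.' then
      (if (g ++ [c]).length > 2 ∧ PySem.List.pyGet? (g ++ [c]) 0 = some '0'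
        then PySem.List.slice (g ++ [c]) (some 1) none else g ++ [c])
        ++ renderF [] rest
    else if rest = [] then
      if 2 ≤ (g ++ [c]).length ∧ PySem.List.pyGet? (g ++ [c]) 0 = some '0'
        then PySem.List.slice (g ++ [c]) (some 1) none else g ++ [c]
    else renderF (g ++ [c]) rest

theorem foldA_eq (n : Nat) (cs : List Char) : ∀ (out g : List Char) (count : Nat),
    count + cs.length = n + 1 →
    (cs.foldl (formatterStep n) (out, g, count)).1 = out ++ renderF g cs := by
  induction cs with
  | nil => intro out g count h; simp [renderF]
  | cons c rest ih =>
    intro out g count h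
    have h' : (count + 1) + rest.length = n + 1 := by
      simp only [List.length_cons] at h; omega
    rw [List.foldl_cons]
    by_cases hc : c = '.'
    · simp only [formatterStep, if_pos hc]
      rw [renderF, if_pos hc]
      split_ifs with hg
      · rw [ih _ _ _ h', List.append_assoc]
      · rw [ih _ _ _ h', List.append_assoc]
    · by_cases hcnt : count = n
      · have hrest : rest = [] := by
          simp only [List.length_cons] at h
          exact List.length_eq_zero_iff.mp (by omega)
        subst hrest
        simp only [formatterStep, if_neg hc, if_pos hcnt]
        rw [renderF, if_neg hc, if_pos rfl]
        split_ifs with hg <;> simp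
      · have hrest : rest ≠ [] := by
          intro he; subst he
          simp only [List.length_cons, List.length_nil] at h
          omega
        simp only [formatterStep, if_neg hc, if_neg hcnt]
        rw [renderF, if_neg hc, if_neg hrest]
        exact ih _ _ _ h'

theorem stripZero_dot (g : List Char) :
    (if (g ++ ['.']).length > 2 ∧ PySem.List.pyGet? (g ++ ['.']) 0 = some '0'
      then PySem.List.slice (g ++ ['.']) (some 1) none else g ++ ['.'])
    = stripZero g ++ ['.'] := by
  unfold stripZero
  cases g with
  | nil => simp
  | cons a t =>
    rw [List.cons_append, pyGet?_cons_zero, pyGet?_cons_zero]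
    by_cases h0 : a = '0'
    · subst h0
      by_cases hl : 2 ≤ ('0' :: t).length
      · rw [if_pos ⟨by simp at hl ⊢; omega, rfl⟩, if_pos ⟨hl, rfl⟩,
            slice_one, slice_one]
        simp
      · have ht : t = [] := by
          cases t with
          | nil => rfl
          | cons b u => simp at hl
        subst ht
        rw [if_neg (by simp), if_neg (by simp)]
        simp
    · rw [if_neg (by rintro ⟨-, hx⟩; exact h0 (by simpa using hx)),
          if_neg (by rintro ⟨-, hx⟩; exact h0 (by simpa using hx))]
      simp

theorem splitOn_ne_nil (cs : List Char) : cs.splitOn '.' ≠ [] :=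
  List.splitOnP_ne_nil _ _

theorem renderF_eq (cs : List Char) : ∀ g : List Char, cs ≠ [] →
    renderF g cs =
      List.intercalate ['.'] (((cs.splitOn '.').modifyHead (g ++ ·)).map stripZero) := by
  induction cs with
  | nil => intro g h; exact absurd rfl h
  | cons c rest ih =>
    intro g _
    by_cases hc : c = '.'
    · subst hc
      rw [show ('.' :: rest).splitOn '.' = [] :: rest.splitOn '.' by
        simp [List.splitOn, List.splitOnP_cons]]
      obtain ⟨p, ps, hps⟩ := List.exists_cons_of_ne_nil (splitOn_ne_nil rest)
      rw [renderF, if_pos rfl, stripZero_dot]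
      simp only [List.modifyHead_cons, List.append_nil, List.map_cons]
      rw [intercalate_cons, if_neg (by simp [hps])]
      cases hrest : rest with
      | nil =>
        subst hrest
        have hp : p = [] ∧ ps = [] := by
          have : ([] : List Char).splitOn '.' = [[]] := by
            simp [List.splitOn, List.splitOnP_nil]
          rw [this] at hps
          exact ⟨(List.cons.injEq _ _ _ _ ▸ hps.symm).1.symm ▸ rfl, by
            injection hps with h1 h2; exact h2.symm⟩
        rw [renderF, hps, hp.1, hp.2]
        simp [stripZero, List.intercalate]
      | cons d u =>
        subst hrest
        rw [ih [] (by simp), hps, List.modifyHead_cons]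
        simp
    · cases hrest : rest with
      | nil =>
        rw [renderF, if_neg hc, if_pos rfl]
        rw [show ([c]).splitOn '.' = [[c]] by
          simp [List.splitOn, List.splitOnP_cons, List.splitOnP_nil, hc]]
        simp [stripZero, List.intercalate]
      | cons d u =>
        subst hrest
        rw [renderF, if_neg hc, if_neg (by simp), ih (g ++ [c]) (by simp)]
        rw [show (c :: d :: u).splitOn '.' = ((d :: u).splitOn '.').modifyHead (c :: ·) by
          simp [List.splitOn, List.splitOnP_cons, hc]]
        obtain ⟨p, ps, hps⟩ := List.exists_cons_of_ne_nil (splitOn_ne_nil (d :: u))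
        rw [hps, List.modifyHead_cons, List.modifyHead_cons, List.modifyHead_cons]
        simp

-- ===== VERDICT (by name: the statement is the Claim_ definition above) =====
theorem formatter_spec : Claim_equal_formatter := by
  intro s _
  unfold Spec_formatter formatter formatter_alt
  cases hcs : s.toList with
  | nil =>
    simp [List.splitOn, List.splitOnP_nil, stripZero, List.intercalate]
  | cons c rest =>
    rw [foldA_eq _ _ [] [] 1 (by simp; omega), renderF_eq _ [] (by simp)]
    obtain ⟨p, ps, hps⟩ := List.exists_cons_of_ne_nil (splitOn_ne_nil (c :: rest))
    rw [hps]
    simp
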